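-- pv_equiv track=rewrite | github.com/vittot/weakly-supervised-classification-italian-discharge-letters | pipeline/diagnosis_clustering.py | get_mapping_bronchio
-- ===== SOURCE A (Python) =====
-- def get_mapping_bronchio(keywords):
--     disease_keywords = [
--         {
--             'positive': ['bronchiolite'],
--             'negative': [],
--         },
--         {
--             'positive' : ['broncospasmo', 'febbre'],
--             'negative' : [],
--         }
--     ]
--     for rule in disease_keywords:
--         # all positive keywords must appear
--         positives_ok = all(
--             any(pk in kw for kw in keywords)
--             for pk in rule['positive']
--         )
--
--         # no negative keyword must appear
--         negatives_ok = not any(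
--             nk in kw
--             for nk in rule['negative']
--             for kw in keywords
--         )
--
--         if positives_ok and negatives_ok:
--             return True
--     return False
-- ===== SOURCE B (Python) =====
-- def get_mapping_bronchio(keywords):
--     # Rule 1: any keyword mentions bronchiolitis directly.
--     if any('bronchiolite' in kw for kw in keywords):
--         return True
--     # Rule 2: bronchospasm together with fever.
--     if any('broncospasmo' in kw for kw in keywords) and any('febbre' in kw for kw in keywords):
--         return True
--     return False
-- ===== Notes on version B (the rewrite author's own statement) =====
-- stated objective: simpler
-- what changed: Replaced the generic rule-table traversal (list of dicts with nested all/any over positive/negative keyword lists) by the two concrete rules written out as direct substring checks with no table, no dict lookups and no negative-keyword machinery.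
import Mathlib
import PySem

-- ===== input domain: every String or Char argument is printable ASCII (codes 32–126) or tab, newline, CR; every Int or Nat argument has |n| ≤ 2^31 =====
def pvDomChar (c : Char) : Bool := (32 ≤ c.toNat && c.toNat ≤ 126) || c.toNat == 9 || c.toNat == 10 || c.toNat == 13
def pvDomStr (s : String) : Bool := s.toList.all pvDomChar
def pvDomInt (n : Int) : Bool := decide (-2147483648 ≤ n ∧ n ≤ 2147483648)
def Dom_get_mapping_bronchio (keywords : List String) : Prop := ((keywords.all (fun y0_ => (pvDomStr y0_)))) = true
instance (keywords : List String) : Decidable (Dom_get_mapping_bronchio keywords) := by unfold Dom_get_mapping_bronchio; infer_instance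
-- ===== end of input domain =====

-- B drops A's generic rule-table traversal and writes the two concrete rules as direct substring checks (objective: simpler).

-- ===== PORT A =====
-- the literal rule table: (positive, negative) keyword lists
def bronchioRules : List (List String × List String) :=
  [(["bronchiolite"], []), (["broncospasmo", "febbre"], [])]

-- the 'for rule in disease_keywords' loop, rule by rule
def bronchioLoop (keywords : List String) : List (List String × List String) → Bool
  | [] => false
  | rule :: rest =>
    let positives_ok := rule.1.all (fun pk => keywords.any (fun kw => PySem.Str.isIn pk kw))
    let negatives_ok := !(rule.2.any (fun nk => keywords.any (fun kw => PySem.Str.isIn nk kw)))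
    if positives_ok && negatives_ok then true else bronchioLoop keywords rest

def get_mapping_bronchio (keywords : List String) : Bool :=
  bronchioLoop keywords bronchioRules

-- ===== PORT B =====
def get_mapping_bronchio_alt (keywords : List String) : Bool :=
  if keywords.any (fun kw => PySem.Str.isIn "bronchiolite" kw) then true
  else if keywords.any (fun kw => PySem.Str.isIn "broncospasmo" kw)
          && keywords.any (fun kw => PySem.Str.isIn "febbre" kw) then true
  else false

-- ===== PRECONDITION & SPEC =====
def Spec_get_mapping_bronchio (keywords : List String) (out : Bool) : Prop := out = get_mapping_bronchio_alt keywords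
instance (keywords : List String) (out : Bool) : Decidable (Spec_get_mapping_bronchio keywords out) := by unfold Spec_get_mapping_bronchio; infer_instance

-- ===== CLAIM (what is proved, stated in full; the proofs are below) =====
def Claim_equal_get_mapping_bronchio : Prop := ∀ (keywords : List String), Dom_get_mapping_bronchio keywords → Spec_get_mapping_bronchio keywords (get_mapping_bronchio keywords)

-- ===== LEMMAS AND PROOFS =====

-- ===== VERDICT (by name: the statement is the Claim_ definition above) =====
theorem get_mapping_bronchio_spec : Claim_equal_get_mapping_bronchio := by
  intro keywords _
  unfold Spec_get_mapping_bronchio get_mapping_bronchio get_mapping_bronchio_alt bronchioLoop bronchioRules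
  simp only [List.all_cons, List.all_nil, List.any_nil, Bool.not_false, Bool.and_true]
  by_cases h1 : keywords.any (fun kw => PySem.Str.isIn "bronchiolite" kw) <;>
  by_cases h2 : keywords.any (fun kw => PySem.Str.isIn "broncospasmo" kw) <;>
  by_cases h3 : keywords.any (fun kw => PySem.Str.isIn "febbre" kw) <;>
  simp_all [bronchioLoop]
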